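-- pv_equiv track=rewrite | github.com/nec-research/KGEval | tests/symmetry/utils/setup.py | get_filters
-- ===== SOURCE A (Python) =====
-- import collections
--
-- def get_filters(examples):
--   """
--   Returns rhs_final: Dictionary mapping queries (entity, relation) to filtered entities for right-hand-side prediction
--   Params
--   ----------
--   examples: Numpy array of size n_examples x 3 containing KG triples
--   """
--   rhs_filters = collections.defaultdict(set)
--   for lhs, rel, rhs in examples:
--       rhs_filters[(lhs, rel)].add(rhs)
--   rhs_final = {}
--   for k, v in rhs_filters.items():
--       rhs_final[k] = sorted(list(v))
--   return rhs_final
-- ===== SOURCE B (Python) =====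
-- def _insort_unique(lst, x):
--     # return a sorted duplicate-free list = lst with x inserted at its place (lst unchanged if x already present)
--     i = 0
--     n = len(lst)
--     while i < n and lst[i] < x:
--         i += 1
--     if i < n and lst[i] == x:
--         return lst
--     return lst[:i] + [x] + lst[i:]
--
--
-- def get_filters(examples):
--     # single pass: keep each query's rhs list sorted and duplicate-free as we go,
--     # instead of accumulating sets and sorting in a second pass
--     rhs_final = {}
--     for lhs, rel, rhs in examples:
--         rhs_final[(lhs, rel)] = _insort_unique(rhs_final.get((lhs, rel), []), rhs)
--     return rhs_final
-- ===== Notes on version B (the rewrite author's own statement) =====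
-- stated objective: alternative
-- what changed: B builds each query's rhs list directly in sorted, duplicate-free form by ordered insertion during a single pass, replacing A's set accumulation followed by a second pass that sorts every set.
import Mathlib
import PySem

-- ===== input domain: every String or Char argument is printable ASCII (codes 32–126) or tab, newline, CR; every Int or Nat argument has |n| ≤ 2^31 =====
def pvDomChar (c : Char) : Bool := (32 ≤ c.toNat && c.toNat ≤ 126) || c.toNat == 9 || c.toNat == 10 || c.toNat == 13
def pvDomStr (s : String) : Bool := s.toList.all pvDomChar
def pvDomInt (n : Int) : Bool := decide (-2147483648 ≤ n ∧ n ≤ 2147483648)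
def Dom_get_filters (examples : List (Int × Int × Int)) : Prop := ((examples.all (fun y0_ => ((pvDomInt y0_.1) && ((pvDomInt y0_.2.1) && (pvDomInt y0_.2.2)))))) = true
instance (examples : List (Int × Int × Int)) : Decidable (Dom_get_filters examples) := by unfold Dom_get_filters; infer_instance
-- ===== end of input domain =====

-- B groups triples in a single pass keeping each rhs list sorted and duplicate-free by
-- ordered insertion, instead of A's set accumulation followed by a second sorting pass.

-- ===== PORT A =====
def get_filters (examples : List (Int × Int × Int)) : List (Int × Int × List Int) :=
  -- loop 1: rhs_filters = defaultdict(set); rhs_filters[(lhs, rel)].add(rhs)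
  -- loop 2: rhs_final = {}; for k, v in rhs_filters.items(): rhs_final[k] = sorted(list(v))
  ((examples.foldl
      (fun d t => d.modify (t.1, t.2.1) PySem.Set.empty (fun s => PySem.Set.add s t.2.2))
      PySem.Dict.empty).items.foldl
    (fun d kv => d.insert kv.1 (PySem.List.sorted kv.2 (fun x => x) false))
    PySem.Dict.empty).items.map (fun kv => (kv.1.1, kv.1.2, kv.2))

-- ===== PORT B =====
-- _insort_unique(lst, x): scan past elements < x; keep lst if x is found, else insert x there
def insortU (x : Int) : List Int → List Int
  | [] => [x]
  | y :: t => if x < y then x :: y :: t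
              else if x = y then y :: t
              else y :: insortU x t

def get_filters_alt (examples : List (Int × Int × Int)) : List (Int × Int × List Int) :=
  -- single loop: rhs_final[(lhs, rel)] = _insort_unique(rhs_final.get((lhs, rel), []), rhs)
  (examples.foldl
      (fun d t => d.insert (t.1, t.2.1) (insortU t.2.2 (d.getD (t.1, t.2.1) [])))
      PySem.Dict.empty).items.map (fun kv => (kv.1.1, kv.1.2, kv.2))

-- ===== PRECONDITION & SPEC =====
def Spec_get_filters (examples : List (Int × Int × Int)) (out : List (Int × Int × List Int)) : Prop := out = get_filters_alt examples
instance (examples : List (Int × Int × Int)) (out : List (Int × Int × List Int)) : Decidable (Spec_get_filters examples out) := by unfold Spec_get_filters; infer_instance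

-- ===== CLAIM (what is proved, stated in full; the proofs are below) =====
def Claim_equal_get_filters : Prop := ∀ (examples : List (Int × Int × Int)), Dom_get_filters examples → Spec_get_filters examples (get_filters examples)

-- ===== LEMMAS AND PROOFS =====

-- x always ends up in the result of ordered insertion
theorem mem_insortU_self (x : Int) (l : List Int) : x ∈ insortU x l := by
  induction l with
  | nil => simp [insortU]
  | cons y t ih =>
    by_cases hlt : x < y
    · simp [insortU, hlt]
    · by_cases heq : x = y
      · simp [insortU, heq]
      · simp only [insortU, if_neg hlt, if_neg heq]
        exact List.mem_cons_of_mem y ih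

-- if x already occurs in a ≤-sorted list, ordered insertion leaves it unchanged
theorem insortU_of_mem (x : Int) (l : List Int)
    (hs : l.Pairwise (· ≤ ·)) (hm : x ∈ l) : insortU x l = l := by
  induction l with
  | nil => cases hm
  | cons y t ih =>
    rcases List.pairwise_cons.mp hs with ⟨hy, ht⟩
    rcases List.mem_cons.mp hm with rfl | hmt
    · simp [insortU]
    · have hyx : y ≤ x := hy x hmt
      by_cases hlt : x < y
      · omega
      · by_cases heq : x = y
        · simp [insortU, heq]
        · simp [insortU, hlt, heq, ih ht hmt]

-- ordered insertion either permutes x into the list or (x found) returns it unchanged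
theorem insortU_perm (x : Int) (l : List Int) : (insortU x l).Perm (x :: l) ∨ insortU x l = l := by
  induction l with
  | nil => left; simp [insortU]
  | cons y t ih =>
    by_cases hlt : x < y
    · left; simp only [insortU, if_pos hlt]; exact List.Perm.refl _
    · by_cases heq : x = y
      · right; simp [insortU, heq]
      · simp only [insortU, if_neg hlt, if_neg heq]
        rcases ih with hperm | heqt
        · left; exact (List.Perm.cons y hperm).trans (List.Perm.swap x y t)
        · right; rw [heqt]

-- ordered insertion preserves ≤-sortedness
theorem insortU_sorted (x : Int) (l : List Int)
    (hs : l.Pairwise (· ≤ ·)) : (insortU x l).Pairwise (· ≤ ·) := by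
  induction l with
  | nil => simp [insortU]
  | cons y t ih =>
    rcases List.pairwise_cons.mp hs with ⟨hy, ht⟩
    by_cases hlt : x < y
    · simp only [insortU, if_pos hlt]
      refine List.pairwise_cons.mpr ⟨?_, hs⟩
      intro a ha
      rcases List.mem_cons.mp ha with rfl | hat
      · omega
      · have := hy a hat; omega
    · by_cases heq : x = y
      · simp only [insortU, if_neg hlt, if_pos heq]
        exact hs
      · simp only [insortU, if_neg hlt, if_neg heq]
        refine List.pairwise_cons.mpr ⟨?_, ih ht⟩
        intro a ha
        rcases insortU_perm x t with hperm | heqt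
        · rcases List.mem_cons.mp (hperm.mem_iff.mp ha) with rfl | hat
          · omega
          · exact hy a hat
        · exact hy a (heqt ▸ ha)

-- the key algebraic fact: ordered insertion into the sorted list = sorting after set-add
theorem insortU_sorted_add (x : Int) (v : PySem.Set Int) :
    insortU x (PySem.List.sorted v (fun y => y) false) =
      PySem.List.sorted (PySem.Set.add v x) (fun y => y) false := by
  by_cases hm : v.contains x = true
  · have hx : x ∈ v := by simp [PySem.Set.contains] at hm; exact hm
    have hadd : PySem.Set.add v x = v := by simp [PySem.Set.add]; exact hx
    rw [hadd]
    exact insortU_of_mem x _ (PySem.List.sorted_pairwise v (fun y => y))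
      ((PySem.List.sorted_perm v (fun y => y) false).mem_iff.mpr hx)
  · have hxv : x ∉ v := by simp [PySem.Set.contains] at hm; exact hm
    have hadd : PySem.Set.add v x = v ++ [x] := by simp [PySem.Set.add]; exact hxv
    rw [hadd]
    have hperm : (insortU x (PySem.List.sorted v (fun y => y) false)).Perm
        (PySem.List.sorted (v ++ [x]) (fun y => y) false) := by
      rcases insortU_perm x (PySem.List.sorted v (fun y => y) false) with hp | heq
      · refine hp.trans ?_
        refine (List.Perm.cons x (PySem.List.sorted_perm v (fun y => y) false)).trans ?_
        refine (List.perm_append_comm (l₁ := [x]) (l₂ := v)).trans ?_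
        exact (PySem.List.sorted_perm (v ++ [x]) (fun y => y) false).symm
      · exfalso
        have hx : x ∈ PySem.List.sorted v (fun y => y) false := by
          rw [← heq]; exact mem_insortU_self x _
        exact hxv ((PySem.List.sorted_perm v (fun y => y) false).mem_iff.mp hx)
    exact List.Perm.eq_of_pairwise (fun a b _ _ h1 h2 => le_antisymm h1 h2)
      (insortU_sorted x _ (PySem.List.sorted_pairwise v (fun y => y)))
      (PySem.List.sorted_pairwise (v ++ [x]) (fun y => y)) hperm

-- the two grouping loops maintain: B's value at every key is the sorted version of A's set
theorem fold_getD_invariant (l : List (Int × Int × Int))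
    (dA : PySem.Dict (Int × Int) (PySem.Set Int)) (dB : PySem.Dict (Int × Int) (List Int))
    (h : ∀ k, dB.getD k [] = PySem.List.sorted (dA.getD k PySem.Set.empty) (fun y => y) false) :
    ∀ k, (l.foldl (fun d t => d.insert (t.1, t.2.1) (insortU t.2.2 (d.getD (t.1, t.2.1) []))) dB).getD k []
      = PySem.List.sorted
          ((l.foldl (fun d t => d.modify (t.1, t.2.1) PySem.Set.empty (fun s => PySem.Set.add s t.2.2)) dA).getD k PySem.Set.empty)
          (fun y => y) false := by
  induction l generalizing dA dB with
  | nil => exact h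
  | cons t rest ih =>
    simp only [List.foldl_cons]
    apply ih
    intro k
    rw [PySem.Dict.getD_insert, PySem.Dict.getD_modify]
    by_cases hk : k = (t.1, t.2.1)
    · simp only [if_pos hk]
      rw [h (t.1, t.2.1), insortU_sorted_add]
    · simp only [if_neg hk]
      exact h k

theorem get_filters_eq (examples : List (Int × Int × Int)) :
    get_filters examples = get_filters_alt examples := by
  unfold get_filters get_filters_alt
  set dA := examples.foldl (fun d t => d.modify (t.1, t.2.1) PySem.Set.empty (fun s => PySem.Set.add s t.2.2)) PySem.Dict.empty with hdA
  set dB := examples.foldl (fun d t => d.insert (t.1, t.2.1) (insortU t.2.2 (d.getD (t.1, t.2.1) []))) PySem.Dict.empty with hdB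
  have hndA : dA.keys.Nodup := by
    rw [hdA]
    exact PySem.Dict.nodup_keys_foldl_modify_key examples (fun t => (t.1, t.2.1)) PySem.Set.empty
      (fun d t s => PySem.Set.add s t.2.2) PySem.Dict.empty (by simp)
  have hndB : dB.keys.Nodup := by
    rw [hdB]
    exact PySem.Dict.nodup_keys_foldl_insert_key examples (fun t => (t.1, t.2.1))
      (fun d t => insortU t.2.2 (d.getD (t.1, t.2.1) [])) PySem.Dict.empty (by simp)
  have hkeys : dB.keys = dA.keys := by
    rw [hdA, hdB,
      PySem.Dict.keys_foldl_insert_key examples (fun t => (t.1, t.2.1)) (fun d t => insortU t.2.2 (d.getD (t.1, t.2.1) [])),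
      PySem.Dict.keys_foldl_modify_key examples (fun t => (t.1, t.2.1)) PySem.Set.empty (fun d t s => PySem.Set.add s t.2.2)]
  have hval : ∀ k, dB.getD k [] = PySem.List.sorted (dA.getD k PySem.Set.empty) (fun y => y) false := by
    intro k
    rw [hdA, hdB]
    exact fold_getD_invariant examples PySem.Dict.empty PySem.Dict.empty
      (by intro k; simp [PySem.Dict.getD_empty, PySem.List.sorted]) k
  -- A's second loop writes fresh distinct keys: it appends dA's items with sorted values
  have hsecond :
      (dA.items.foldl (fun d kv => d.insert kv.1 (PySem.List.sorted kv.2 (fun x => x) false)) PySem.Dict.empty).items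
        = dA.items.map (fun kv => (kv.1, PySem.List.sorted kv.2 (fun x => x) false)) := by
    have := PySem.Dict.items_foldl_insert_fresh dA.items (fun kv => kv.1)
      (fun kv => PySem.List.sorted kv.2 (fun x => x) false) PySem.Dict.empty
      (fun a _ => PySem.Dict.contains_empty a.1) (by simpa [PySem.Dict.keys] using hndA)
    simpa using this
  rw [hsecond,
    PySem.Dict.items_eq_map_keys dA hndA PySem.Set.empty,
    PySem.Dict.items_eq_map_keys dB hndB [],
    hkeys]
  simp only [List.map_map]
  apply List.map_congr_left
  intro k _
  simp [Function.comp, hval k]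

-- ===== VERDICT (by name: the statement is the Claim_ definition above) =====
theorem get_filters_spec : Claim_equal_get_filters := by
  intro examples _
  unfold Spec_get_filters
  exact get_filters_eq examples
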